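-- pv_equiv track=rewrite | github.com/papilo-cloud/Python_Data_Structures- | Algos/100_sum_array.py | one_hundred_sum
-- ===== SOURCE A (Python) =====
-- def one_hundred_sum(list):
--     left_index = 0
--     right_index = len(list) - 1
--
--     while left_index < (len(list) / 2):
--         if list[left_index] + list[right_index] != 100:
--             return False
--         left_index += 1
--         right_index -= 1
--
--     return True
-- ===== SOURCE B (Python) =====
-- def one_hundred_sum(list):
--     return list == [100 - x for x in reversed(list)]
-- ===== Notes on version B (the rewrite author's own statement) =====
-- stated objective: idiomatic
-- what changed: Replaces the two-pointer half-scan while-loop with a whole-structure comparison: the list is compared for equality with its reversed complement [100 - x for x in reversed(list)].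
import Mathlib
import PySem

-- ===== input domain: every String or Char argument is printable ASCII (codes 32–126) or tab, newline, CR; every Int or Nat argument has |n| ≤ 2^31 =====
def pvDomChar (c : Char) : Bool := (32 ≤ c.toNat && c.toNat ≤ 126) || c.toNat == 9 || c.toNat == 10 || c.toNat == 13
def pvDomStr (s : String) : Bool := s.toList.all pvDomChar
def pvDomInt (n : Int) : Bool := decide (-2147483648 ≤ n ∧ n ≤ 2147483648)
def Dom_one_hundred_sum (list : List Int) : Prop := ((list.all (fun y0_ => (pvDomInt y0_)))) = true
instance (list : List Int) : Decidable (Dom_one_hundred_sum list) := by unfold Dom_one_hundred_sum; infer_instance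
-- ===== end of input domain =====

-- B replaces A's inward two-pointer while-loop by comparing the list with its
-- reversed complement [100 - x for x in reversed(list)] (objective: idiomatic).

-- ===== PORT A =====
-- A's while-loop: left/right indices, loop while left_index < len(list)/2.
-- 'left < len/2' (float division) is exact as '2*left < len' for these ints.
-- list[i] is always in range inside the loop, so pyGetD with default 0 is exact.
def pvAgo (xs : List Int) : Nat → Int → Int → Bool
  | 0, _, _ => true
  | fuel+1, l, r =>
    if 2*l < (xs.length : Int) then
      if PySem.List.pyGetD xs l 0 + PySem.List.pyGetD xs r 0 ≠ 100 then false
      else pvAgo xs fuel (l+1) (r-1)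
    else true

def one_hundred_sum (list : List Int) : Bool :=
  pvAgo list (list.length + 1) 0 ((list.length : Int) - 1)

-- ===== PORT B =====
def one_hundred_sum_alt (list : List Int) : Bool :=
  list == list.reverse.map (fun x => 100 - x)

-- ===== PRECONDITION & SPEC =====
def Spec_one_hundred_sum (list : List Int) (out : Bool) : Prop := out = one_hundred_sum_alt list
instance (list : List Int) (out : Bool) : Decidable (Spec_one_hundred_sum list out) := by unfold Spec_one_hundred_sum; infer_instance

-- ===== CLAIM (what is proved, stated in full; the proofs are below) =====
def Claim_equal_one_hundred_sum : Prop := ∀ (list : List Int), Dom_one_hundred_sum list → Spec_one_hundred_sum list (one_hundred_sum list)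

-- ===== LEMMAS AND PROOFS =====

-- Half-range pair condition (what A's loop checks).
def pvPhalf (xs : List Int) : Prop :=
  ∀ i : Nat, 2 * i < xs.length → xs.getD i 0 + xs.getD (xs.length - 1 - i) 0 = 100

-- Full-range pair condition (what B's structural equality checks).
def pvPfull (xs : List Int) : Prop :=
  ∀ i : Nat, i < xs.length → xs.getD i 0 + xs.getD (xs.length - 1 - i) 0 = 100

theorem pvAgo_true_iff (xs : List Int) :
    ∀ (fuel l : Nat), xs.length ≤ fuel + l →
      (pvAgo xs fuel (l : Int) ((xs.length : Int) - 1 - (l : Int)) = true ↔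
        ∀ i : Nat, l ≤ i → 2 * i < xs.length →
          xs.getD i 0 + xs.getD (xs.length - 1 - i) 0 = 100) := by
  intro fuel
  induction fuel with
  | zero =>
      intro l hl
      simp only [pvAgo]
      constructor
      · intro _ i hi h2; omega
      · intro _; trivial
  | succ fuel ih =>
      intro l hl
      simp only [pvAgo]
      by_cases hc : 2 * (l : Int) < (xs.length : Int)
      · have hlt : 2 * l < xs.length := by exact_mod_cast hc
        rw [if_pos hc]
        have h1 : PySem.List.pyGetD xs (l : Int) 0 = xs.getD l 0 :=
          PySem.List.pyGetD_natCast xs l 0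
        have hcast : ((xs.length : Int) - 1 - (l : Int)) = ((xs.length - 1 - l : Nat) : Int) := by
          omega
        have h2 : PySem.List.pyGetD xs ((xs.length : Int) - 1 - (l : Int)) 0
            = xs.getD (xs.length - 1 - l) 0 := by
          rw [hcast]; exact PySem.List.pyGetD_natCast xs _ 0
        rw [h1, h2]
        by_cases hs : xs.getD l 0 + xs.getD (xs.length - 1 - l) 0 = 100
        · rw [if_neg (by simpa using hs)]
          have hrec : ((l : Int) + 1) = ((l + 1 : Nat) : Int) := by push_cast; ring
          have hrec2 : ((xs.length : Int) - 1 - (l : Int) - 1)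
              = ((xs.length : Int) - 1 - ((l + 1 : Nat) : Int)) := by push_cast; ring
          rw [hrec, hrec2, ih (l + 1) (by omega)]
          constructor
          · intro h i hi h2i
            rcases Nat.eq_or_lt_of_le hi with rfl | hi'
            · exact hs
            · exact h i hi' h2i
          · intro h i hi h2i
            exact h i (by omega) h2i
        · rw [if_pos (by simpa using hs)]
          constructor
          · intro h; exact absurd h (by simp)
          · intro h; exact absurd (h l le_rfl hlt) hs
      · rw [if_neg hc]
        have : ¬ 2 * l < xs.length := by exact_mod_cast hc
        constructor
        · intro _ i hi h2; omega
        · intro _; trivial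

theorem pvA_true_iff (xs : List Int) : one_hundred_sum xs = true ↔ pvPhalf xs := by
  have h := pvAgo_true_iff xs (xs.length + 1) 0 (by omega)
  simpa [one_hundred_sum, pvPhalf] using h

theorem pvB_true_iff (xs : List Int) : one_hundred_sum_alt xs = true ↔ pvPfull xs := by
  unfold one_hundred_sum_alt pvPfull
  rw [beq_iff_eq]
  constructor
  · intro h i hi
    have hlen : i < (xs.reverse.map (fun x => 100 - x)).length := by simpa using hi
    have := congrArg (fun l => l.getD i (0 : Int)) h
    simp only [List.getD_eq_getElem _ _ hi, List.getD_eq_getElem _ _ hlen] at this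
    rw [List.getElem_map, List.getElem_reverse] at this
    have hlt : xs.length - 1 - i < xs.length := by omega
    rw [List.getD_eq_getElem _ _ hi, List.getD_eq_getElem _ _ hlt]
    omega
  · intro h
    apply List.ext_getElem (by simp)
    intro i hi hlen
    rw [List.getElem_map, List.getElem_reverse]
    have hlt : xs.length - 1 - i < xs.length := by omega
    have := h i hi
    rw [List.getD_eq_getElem _ _ hi, List.getD_eq_getElem _ _ hlt] at this
    omega

theorem pvPhalf_iff_pvPfull (xs : List Int) : pvPhalf xs ↔ pvPfull xs := by
  constructor
  · intro h i hi
    by_cases h2 : 2 * i < xs.length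
    · exact h i h2
    · have hj : 2 * (xs.length - 1 - i) < xs.length := by omega
      have := h (xs.length - 1 - i) hj
      have hji : xs.length - 1 - (xs.length - 1 - i) = i := by omega
      rw [hji] at this
      omega
  · intro h i h2
    exact h i (by omega)

-- ===== VERDICT (by name: the statement is the Claim_ definition above) =====
theorem one_hundred_sum_spec : Claim_equal_one_hundred_sum := by
  intro list _
  unfold Spec_one_hundred_sum
  have h : one_hundred_sum list = true ↔ one_hundred_sum_alt list = true := by
    rw [pvA_true_iff, pvB_true_iff, pvPhalf_iff_pvPfull]
  cases hA : one_hundred_sum list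
  · cases hB : one_hundred_sum_alt list
    · rfl
    · exact absurd (h.mpr hB) (by simp [hA])
  · exact (h.mp hA).symm
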